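-- pv_equiv track=rewrite | github.com/edgul/demo | problems/catbox/catbox.py | move_cat
-- ===== SOURCE A (Python) =====
-- def or_bw(arr1, arr2):
-- 	new_arr = arr1[:]
-- 	for i,v in enumerate(arr2):
-- 		if v==1:
-- 			new_arr[i] = 1
-- 	return new_arr
--
-- def move_cat(arr):
-- 	new_arr = [0] * len(arr)
-- 	for i,v in enumerate(arr):
-- 		if v==1:
-- 			if i-1 >= 0:
-- 				temp = new_arr[:]
-- 				temp[i-1] = 1
-- 				temp[i] = 0
-- 				new_arr = or_bw(new_arr, temp)
-- 			if i+1 < len(arr):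
-- 				temp = new_arr[:]
-- 				temp[i+1] = 1
-- 				temp[i] = 0
-- 				new_arr = or_bw(new_arr, temp)
-- 	return new_arr
-- ===== SOURCE B (Python) =====
-- def move_cat(arr):
--     n = len(arr)
--     return [1 if ((j > 0 and arr[j - 1] == 1) or (j + 1 < n and arr[j + 1] == 1)) else 0
--             for j in range(n)]
-- ===== Notes on version B (the rewrite author's own statement) =====
-- stated objective: alternative
-- what changed: Replaced the per-cat full-array copies and bitwise-or merges with a single comprehension that computes each output cell directly from its two neighbours.
import Mathlib
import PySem

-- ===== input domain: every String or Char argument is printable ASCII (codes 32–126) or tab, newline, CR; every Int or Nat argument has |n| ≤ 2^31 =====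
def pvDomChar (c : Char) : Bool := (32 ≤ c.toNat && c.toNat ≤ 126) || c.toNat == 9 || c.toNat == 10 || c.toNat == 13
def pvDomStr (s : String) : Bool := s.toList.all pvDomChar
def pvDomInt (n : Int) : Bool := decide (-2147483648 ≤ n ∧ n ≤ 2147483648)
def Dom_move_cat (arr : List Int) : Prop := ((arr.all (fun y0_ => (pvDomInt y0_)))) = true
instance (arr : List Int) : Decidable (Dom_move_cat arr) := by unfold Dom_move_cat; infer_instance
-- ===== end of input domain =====

-- B replaces A's per-cat array copies and or-merges by one pass that computes each output
-- cell directly from its two neighbours (alternative algorithm, same measured cost).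

-- ===== PORT A =====
def or_bw (arr1 arr2 : List Int) : List Int :=
  (PySem.List.enumerate arr2).foldl
    (fun new_arr p => if p.2 == 1 then PySem.List.pySetD new_arr p.1 1 else new_arr) arr1

def move_cat (arr : List Int) : List Int :=
  (PySem.List.enumerate arr).foldl
    (fun new_arr p =>
      if p.2 == 1 then
        let t1 :=
          if p.1 - 1 ≥ 0 then
            or_bw new_arr (PySem.List.pySetD (PySem.List.pySetD new_arr (p.1 - 1) 1) p.1 0)
          else new_arr
        if p.1 + 1 < (arr.length : Int) then
          or_bw t1 (PySem.List.pySetD (PySem.List.pySetD t1 (p.1 + 1) 1) p.1 0)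
        else t1
      else new_arr)
    (List.replicate arr.length 0)

-- ===== PORT B =====
def move_cat_alt (arr : List Int) : List Int :=
  (PySem.List.pyRange 0 (arr.length : Int) 1).map
    (fun j =>
      if (0 < j ∧ PySem.List.pyGetD arr (j - 1) 0 = 1) ∨
         (j + 1 < (arr.length : Int) ∧ PySem.List.pyGetD arr (j + 1) 0 = 1) then (1 : Int) else 0)

-- ===== PRECONDITION & SPEC =====
def Spec_move_cat (arr : List Int) (out : List Int) : Prop := out = move_cat_alt arr
instance (arr : List Int) (out : List Int) : Decidable (Spec_move_cat arr out) := by unfold Spec_move_cat; infer_instance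

-- ===== CLAIM (what is proved, stated in full; the proofs are below) =====
def Claim_equal_move_cat : Prop := ∀ (arr : List Int), Dom_move_cat arr → Spec_move_cat arr (move_cat arr)

-- ===== LEMMAS AND PROOFS =====

-- getD of a set at a nonnegative Int index
theorem getD_pySetD (xs : List Int) (i : Int) (hi : 0 ≤ i) (v : Int) (j : Nat) :
    (PySem.List.pySetD xs i v).getD j 0
      = if i = (j : Int) ∧ j < xs.length then v else xs.getD j 0 := by
  rw [PySem.List.pySetD_of_nonneg xs v hi]
  simp only [List.getD, List.getElem?_set]
  by_cases hij : i = (j : Int)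
  · by_cases hj : j < xs.length <;> simp [hij, hj]
  · have h1 : i.toNat ≠ j := by omega
    simp [h1, hij]

-- length invariants
theorem length_or_fold (l : List (Int × Int)) (a : List Int) :
    (l.foldl (fun na p => if p.2 == 1 then PySem.List.pySetD na p.1 1 else na) a).length
      = a.length := by
  induction l generalizing a with
  | nil => rfl
  | cons p l ih =>
      simp only [List.foldl_cons]
      rw [ih]
      by_cases h : p.2 == 1 <;> simp [h, PySem.List.length_pySetD]

theorem length_or_bw (a b : List Int) : (or_bw a b).length = a.length := by
  unfold or_bw; exact length_or_fold _ _

-- pointwise value of or_bw's fold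
theorem getD_or_fold (l : List (Int × Int)) (a : List Int) (j : Nat)
    (hpos : ∀ p ∈ l, 0 ≤ p.1) :
    (l.foldl (fun na p => if p.2 == 1 then PySem.List.pySetD na p.1 1 else na) a).getD j 0
      = if (l.any (fun p => p.2 == 1 && p.1 == (j : Int))) = true ∧ j < a.length then 1
        else a.getD j 0 := by
  induction l generalizing a with
  | nil => simp
  | cons p l ih =>
      simp only [List.foldl_cons]
      rw [ih _ (fun q hq => hpos q (List.mem_cons_of_mem _ hq))]
      by_cases h2 : p.2 = 1
      · simp only [h2, beq_self_eq_true, if_true, PySem.List.length_pySetD,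
          getD_pySetD a p.1 (hpos p List.mem_cons_self) 1 j,
          List.any_cons, Bool.true_and, Bool.or_eq_true, beq_iff_eq]
        split_ifs <;> tauto
      · have hb : (p.2 == 1) = false := by simp [h2]
        simp [hb]

theorem pos_enumerate (b : List Int) : ∀ p ∈ PySem.List.enumerate b 0, 0 ≤ p.1 := by
  intro p hp
  rw [PySem.List.mem_enumerate_iff] at hp
  obtain ⟨k, hk, rfl⟩ := hp
  simp

theorem any_enumerate_eq (b : List Int) (j : Nat) (hj : j < b.length) :
    (PySem.List.enumerate b 0).any (fun p => p.2 == 1 && p.1 == (j : Int))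
      = (b.getD j 0 == 1) := by
  rcases Bool.eq_false_or_eq_true ((b.getD j 0 : Int) == 1) with h | h
  · rw [h]
    rw [List.any_eq_true]
    simp only [beq_iff_eq] at h
    rw [List.getD, List.getElem?_eq_getElem hj] at h
    simp only [Option.getD_some] at h
    refine ⟨((j : Int), b[j]), ?_, ?_⟩
    · rw [PySem.List.mem_enumerate_iff]
      exact ⟨j, hj, by simp⟩
    · simp [h]
  · rw [h]
    rw [List.any_eq_false]
    intro p hp
    rw [PySem.List.mem_enumerate_iff] at hp
    obtain ⟨k, hk, rfl⟩ := hp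
    simp only [zero_add, Bool.and_eq_true, beq_iff_eq, not_and]
    intro h1 h2
    have : k = j := by omega
    subst this
    simp [List.getD, List.getElem?_eq_getElem hk, h1] at h

-- pointwise value of or_bw at equal lengths
theorem getD_or_bw (a b : List Int) (hb : b.length = a.length) (j : Nat) (hj : j < a.length) :
    (or_bw a b).getD j 0 = if b.getD j 0 = 1 then 1 else a.getD j 0 := by
  unfold or_bw
  rw [getD_or_fold _ _ _ (pos_enumerate b), any_enumerate_eq b j (by omega)]
  by_cases h : b.getD j 0 = 1 <;> simp [h, hj]

-- proof-side names for A's loop body (defeq, after zeta, to the lambda in move_cat)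
def stepA1 (na : List Int) (p : Int × Int) : List Int :=
  if p.1 - 1 ≥ 0 then
    or_bw na (PySem.List.pySetD (PySem.List.pySetD na (p.1 - 1) 1) p.1 0)
  else na

def stepA (n : Int) (na : List Int) (p : Int × Int) : List Int :=
  if p.2 == 1 then
    if p.1 + 1 < n then
      or_bw (stepA1 na p) (PySem.List.pySetD (PySem.List.pySetD (stepA1 na p) (p.1 + 1) 1) p.1 0)
    else stepA1 na p
  else na

theorem length_stepA1 (na : List Int) (p : Int × Int) : (stepA1 na p).length = na.length := by
  unfold stepA1
  split_ifs <;> simp [length_or_bw]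

theorem length_stepA (n : Int) (na : List Int) (p : Int × Int) :
    (stepA n na p).length = na.length := by
  unfold stepA
  split_ifs <;> simp [length_or_bw, length_stepA1]

theorem getD_stepA1 (na : List Int) (p : Int × Int) (j : Nat) (hj : j < na.length)
    (hp0 : 0 ≤ p.1) :
    (stepA1 na p).getD j 0 = if p.1 = (j : Int) + 1 then 1 else na.getD j 0 := by
  unfold stepA1
  by_cases h1 : p.1 - 1 ≥ 0
  · rw [if_pos h1, getD_or_bw _ _ (by simp [PySem.List.length_pySetD]) j hj,
        getD_pySetD _ p.1 hp0 0 j, PySem.List.length_pySetD,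
        getD_pySetD na (p.1 - 1) (by omega) 1 j]
    split_ifs <;> omega
  · rw [if_neg h1, if_neg (by omega)]

theorem getD_stepA (n : Int) (na : List Int) (p : Int × Int) (j : Nat)
    (hlen : (na.length : Int) = n) (hj : j < na.length)
    (hp0 : 0 ≤ p.1) (hpn : p.1 < n) :
    (stepA n na p).getD j 0
      = if p.2 = 1 ∧ (p.1 = (j : Int) + 1 ∨ p.1 + 1 = (j : Int)) then 1
        else na.getD j 0 := by
  unfold stepA
  by_cases hv : p.2 = 1
  · simp only [hv, beq_self_eq_true, if_true, true_and]
    by_cases h2 : p.1 + 1 < n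
    · rw [if_pos h2,
          getD_or_bw _ _ (by simp [PySem.List.length_pySetD, length_stepA1]) j
            (by rw [length_stepA1]; exact hj),
          getD_pySetD _ p.1 hp0 0 j, PySem.List.length_pySetD, length_stepA1,
          getD_pySetD _ (p.1 + 1) (by omega) 1 j, length_stepA1,
          getD_stepA1 na p j hj hp0]
      split_ifs <;> omega
    · rw [if_neg h2, getD_stepA1 na p j hj hp0]
      split_ifs <;> omega
  · rw [if_neg (by simp [hv]), if_neg (by simp [hv])]

theorem length_foldA (n : Int) (l : List (Int × Int)) (s : List Int) :
    (l.foldl (stepA n) s).length = s.length := by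
  induction l generalizing s with
  | nil => rfl
  | cons p l ih => simp only [List.foldl_cons]; rw [ih, length_stepA]

theorem getD_foldA (n : Int) (l : List (Int × Int)) (s : List Int) (j : Nat)
    (hlen : (s.length : Int) = n) (hj : j < s.length)
    (hpl : ∀ p ∈ l, 0 ≤ p.1 ∧ p.1 < n) :
    (l.foldl (stepA n) s).getD j 0
      = if (l.any (fun p => p.2 == 1 && (p.1 == (j : Int) + 1 || p.1 + 1 == (j : Int)))) = true
        then 1 else s.getD j 0 := by
  induction l generalizing s with
  | nil => simp
  | cons p l ih =>
      simp only [List.foldl_cons]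
      rw [ih (stepA n s p) (by rw [length_stepA]; exact hlen) (by rw [length_stepA]; exact hj)
            (fun q hq => hpl q (List.mem_cons_of_mem _ hq)),
          getD_stepA n s p j hlen hj (hpl p List.mem_cons_self).1 (hpl p List.mem_cons_self).2]
      simp only [List.any_cons, Bool.or_eq_true, Bool.and_eq_true, beq_iff_eq]
      split_ifs <;> tauto

theorem any_enumerate_neighbors (arr : List Int) (j : Nat) (hj : j < arr.length) :
    (((PySem.List.enumerate arr 0).any
        (fun p => p.2 == 1 && (p.1 == (j : Int) + 1 || p.1 + 1 == (j : Int)))) = true)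
      ↔ ((j + 1 < arr.length ∧ arr.getD (j + 1) 0 = 1) ∨ (0 < j ∧ arr.getD (j - 1) 0 = 1)) := by
  constructor
  · intro h
    rw [List.any_eq_true] at h
    obtain ⟨p, hp, hcond⟩ := h
    rw [PySem.List.mem_enumerate_iff] at hp
    obtain ⟨k, hk, rfl⟩ := hp
    simp only [zero_add, Bool.and_eq_true, Bool.or_eq_true, beq_iff_eq] at hcond
    obtain ⟨h1, h2 | h2⟩ := hcond
    · left
      have : k = j + 1 := by omega
      subst this
      exact ⟨hk, by simp [List.getD, List.getElem?_eq_getElem hk, h1]⟩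
    · right
      have hj0 : 0 < j := by omega
      have : k = j - 1 := by omega
      subst this
      exact ⟨hj0, by simp [List.getD, List.getElem?_eq_getElem hk, h1]⟩
  · intro h
    rw [List.any_eq_true]
    rcases h with ⟨h1, h2⟩ | ⟨h1, h2⟩
    · rw [List.getD, List.getElem?_eq_getElem h1] at h2
      simp only [Option.getD_some] at h2
      refine ⟨((j : Int) + 1, arr[j + 1]), ?_, ?_⟩
      · rw [PySem.List.mem_enumerate_iff]
        refine ⟨j + 1, h1, ?_⟩
        simp
      · simp [h2]
    · have hk : j - 1 < arr.length := by omega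
      rw [List.getD, List.getElem?_eq_getElem hk] at h2
      simp only [Option.getD_some] at h2
      refine ⟨((j : Int) - 1, arr[j - 1]), ?_, ?_⟩
      · rw [PySem.List.mem_enumerate_iff]
        refine ⟨j - 1, hk, ?_⟩
        simp [Prod.ext_iff]
        omega
      · simp [h2]

theorem move_cat_eq_foldA (arr : List Int) :
    move_cat arr
      = (PySem.List.enumerate arr).foldl (stepA (arr.length : Int))
          (List.replicate arr.length 0) := rfl

theorem length_move_cat (arr : List Int) : (move_cat arr).length = arr.length := by
  rw [move_cat_eq_foldA, length_foldA]
  simp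

theorem move_cat_getD (arr : List Int) (j : Nat) (hj : j < arr.length) :
    (move_cat arr).getD j 0
      = if (j + 1 < arr.length ∧ arr.getD (j + 1) 0 = 1) ∨ (0 < j ∧ arr.getD (j - 1) 0 = 1)
        then 1 else 0 := by
  rw [move_cat_eq_foldA,
      getD_foldA (arr.length : Int) _ _ j (by simp) (by simpa using hj)
        (by intro p hp
            rw [PySem.List.mem_enumerate_iff] at hp
            obtain ⟨k, hk, rfl⟩ := hp
            constructor <;> simp <;> omega)]
  rcases Bool.eq_false_or_eq_true ((PySem.List.enumerate arr 0).any
      (fun p => p.2 == 1 && (p.1 == (j : Int) + 1 || p.1 + 1 == (j : Int)))) with h | h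
  · rw [if_pos h, if_pos ((any_enumerate_neighbors arr j hj).mp h)]
  · have hne : ¬ (((PySem.List.enumerate arr 0).any
        (fun p => p.2 == 1 && (p.1 == (j : Int) + 1 || p.1 + 1 == (j : Int)))) = true) := by
      simp [h]
    rw [if_neg hne, if_neg (fun hc => hne ((any_enumerate_neighbors arr j hj).mpr hc)),
        List.getD_replicate _ (by simpa using hj)]

theorem length_move_cat_alt (arr : List Int) : (move_cat_alt arr).length = arr.length := by
  unfold move_cat_alt
  rw [List.length_map, PySem.List.length_pyRange_one]
  omega

theorem move_cat_alt_getD (arr : List Int) (j : Nat) (hj : j < arr.length) :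
    (move_cat_alt arr).getD j 0
      = if (j + 1 < arr.length ∧ arr.getD (j + 1) 0 = 1) ∨ (0 < j ∧ arr.getD (j - 1) 0 = 1)
        then 1 else 0 := by
  unfold move_cat_alt
  rw [List.getD,
      PySem.List.getElem?_map_pyRange_zero
        (fun j : Int =>
          if (0 < j ∧ PySem.List.pyGetD arr (j - 1) 0 = 1) ∨
             (j + 1 < (arr.length : Int) ∧ PySem.List.pyGetD arr (j + 1) 0 = 1)
          then (1 : Int) else 0)
        arr.length j hj]
  simp only [Option.getD_some]
  have e2 : (j : Int) + 1 = ((j + 1 : Nat) : Int) := by omega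
  rw [e2, PySem.List.pyGetD_natCast]
  by_cases h1 : 0 < j
  · have e1 : (j : Int) - 1 = ((j - 1 : Nat) : Int) := by omega
    rw [e1, PySem.List.pyGetD_natCast]
    refine if_congr ?_ rfl rfl
    constructor
    · rintro (⟨_, hx⟩ | ⟨hc, hx⟩)
      · exact Or.inr ⟨h1, hx⟩
      · exact Or.inl ⟨by omega, hx⟩
    · rintro (⟨hc, hx⟩ | ⟨_, hx⟩)
      · exact Or.inr ⟨by omega, hx⟩
      · exact Or.inl ⟨by omega, hx⟩
  · refine if_congr ?_ rfl rfl
    constructor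
    · rintro (⟨hc, _⟩ | ⟨hc, hx⟩)
      · exact absurd hc (by omega)
      · exact Or.inl ⟨by omega, hx⟩
    · rintro (⟨hc, hx⟩ | ⟨hc, _⟩)
      · exact Or.inr ⟨by omega, hx⟩
      · exact absurd hc (by omega)

-- ===== VERDICT (by name: the statement is the Claim_ definition above) =====
theorem move_cat_spec : Claim_equal_move_cat := by
  intro arr _
  unfold Spec_move_cat
  apply List.ext_getElem
  · rw [length_move_cat, length_move_cat_alt]
  · intro j h1 h2
    have hj : j < arr.length := by rw [length_move_cat] at h1; exact h1
    have e1 : (move_cat arr)[j] = (move_cat arr).getD j 0 := by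
      rw [List.getD, List.getElem?_eq_getElem h1]; rfl
    have e2 : (move_cat_alt arr)[j] = (move_cat_alt arr).getD j 0 := by
      rw [List.getD, List.getElem?_eq_getElem h2]; rfl
    rw [e1, e2, move_cat_getD arr j hj, move_cat_alt_getD arr j hj]
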